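-- pv_equiv track=rewrite | github.com/LennyGonz/LeetCode-Questions | Daily-Coding-Problem/problem-246.py | are_degrees_equal
-- ===== SOURCE A (Python) =====
-- from collections import defaultdict
--
-- def are_degrees_equal(graph):
--   in_degree = defaultdict(int)
--   out_degree = defaultdict(int)
--
--   for key, values in graph.items():
--     for v in values:
--       out_degree[key] += 1
--       in_degree[v] += 1
--
--   return in_degree == out_degree
-- ===== SOURCE B (Python) =====
-- def are_degrees_equal(graph):
--   outs = sorted(k for k, vs in graph.items() for _ in vs)
--   ins = sorted(v for vs in graph.values() for v in vs)
--   return outs == ins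
-- ===== Notes on version B (the rewrite author's own statement) =====
-- stated objective: alternative
-- what changed: Replaces the two degree-counting dicts and the dict-equality comparison with no dicts at all: collect the multiset of out-endpoints and the multiset of in-endpoints as lists, sort both, and compare the sorted lists (counter-dict equality is exactly multiset equality).
import Mathlib
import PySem

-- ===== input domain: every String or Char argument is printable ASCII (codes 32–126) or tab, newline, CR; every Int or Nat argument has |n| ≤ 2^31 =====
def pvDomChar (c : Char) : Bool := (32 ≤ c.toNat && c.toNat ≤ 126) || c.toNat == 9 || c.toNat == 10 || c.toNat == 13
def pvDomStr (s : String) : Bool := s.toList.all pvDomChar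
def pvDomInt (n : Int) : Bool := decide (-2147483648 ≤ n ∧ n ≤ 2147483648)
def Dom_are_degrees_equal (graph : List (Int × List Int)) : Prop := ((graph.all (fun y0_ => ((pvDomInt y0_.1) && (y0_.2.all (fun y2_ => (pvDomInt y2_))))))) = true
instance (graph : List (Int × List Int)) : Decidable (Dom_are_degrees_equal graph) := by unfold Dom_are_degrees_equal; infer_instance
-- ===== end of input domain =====

-- B drops A's two counting dicts entirely: it sorts the multiset of out-endpoints and the multiset
-- of in-endpoints and compares the sorted lists (counter equality = multiset equality); alternative, same purpose.

-- ===== PORT A =====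
-- state is (out_degree, in_degree); Python's `in_degree == out_degree` ignores insertion order:
-- ported as CPython's dict comparison (equal size, every item of the left found in the right) — exact.
def are_degrees_equal (graph : List (Int × List Int)) : Bool :=
  let st := graph.foldl
    (fun st kv => kv.2.foldl
      (fun st v => (st.1.modify kv.1 0 (· + 1), st.2.modify v 0 (· + 1))) st)
    ((PySem.Dict.empty : PySem.Dict Int Int), (PySem.Dict.empty : PySem.Dict Int Int))
  st.2.size == st.1.size && st.2.items.all (fun kv => st.1.get? kv.1 == some kv.2)

-- ===== PORT B =====
def are_degrees_equal_alt (graph : List (Int × List Int)) : Bool :=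
  let outs := PySem.List.sorted (graph.flatMap (fun kv => kv.2.map (fun _ => kv.1))) (fun x => x) false
  let ins := PySem.List.sorted (graph.flatMap (fun kv => kv.2)) (fun x => x) false
  outs == ins

-- ===== PRECONDITION & SPEC =====
def Spec_are_degrees_equal (graph : List (Int × List Int)) (out : Bool) : Prop := out = are_degrees_equal_alt graph
instance (graph : List (Int × List Int)) (out : Bool) : Decidable (Spec_are_degrees_equal graph out) := by unfold Spec_are_degrees_equal; infer_instance

-- ===== CLAIM =====
def Claim_equal_are_degrees_equal : Prop := ∀ (graph : List (Int × List Int)), Dom_are_degrees_equal graph → Spec_are_degrees_equal graph (are_degrees_equal graph)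

-- ===== LEMMAS AND PROOFS =====

-- the multiset of out-endpoints (one copy of the key per outgoing edge)
def pvOuts (g : List (Int × List Int)) : List Int := g.flatMap (fun kv => kv.2.map (fun _ => kv.1))
-- the multiset of in-endpoints
def pvIns (g : List (Int × List Int)) : List Int := g.flatMap (fun kv => kv.2)

-- A's nested paired fold splits into two independent folds over pvOuts / pvIns
theorem pvA_fold (g : List (Int × List Int)) (d1 d2 : PySem.Dict Int Int) :
    g.foldl (fun st kv => kv.2.foldl
        (fun st v => (st.1.modify kv.1 0 (· + 1), st.2.modify v 0 (· + 1))) st) (d1, d2)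
      = ((pvOuts g).foldl (fun d x => d.modify x 0 (· + 1)) d1,
         (pvIns g).foldl (fun d x => d.modify x 0 (· + 1)) d2) := by
  induction g generalizing d1 d2 with
  | nil => rfl
  | cons kv g ih =>
      rw [List.foldl_cons,
        PySem.List.foldl_prod_mk (fun d (_ : Int) => d.modify kv.1 0 (· + 1))
          (fun d v => d.modify v 0 (· + 1)) kv.2 d1 d2,
        ih]
      simp only [pvOuts, pvIns, List.flatMap_cons, List.foldl_append, List.foldl_map]

theorem pvIncr_keys (l : List Int) (d : PySem.Dict Int Int) :
    (l.foldl (fun d x => d.modify x 0 (· + 1)) d).keys = PySem.Set.update d.keys l :=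
  PySem.Dict.keys_foldl_modify l 0 (fun _ _ v => v + 1) d

theorem are_degrees_equal_spec : Claim_equal_are_degrees_equal := by
  intro g _
  unfold Spec_are_degrees_equal
  simp only [are_degrees_equal, are_degrees_equal_alt]
  rw [pvA_fold]
  generalize hO' : (pvOuts g).foldl (fun d x => d.modify x 0 (· + 1)) (PySem.Dict.empty : PySem.Dict Int Int) = O
  generalize hI' : (pvIns g).foldl (fun d x => d.modify x 0 (· + 1)) (PySem.Dict.empty : PySem.Dict Int Int) = I
  -- value characterisations
  have hOgetD : ∀ x, O.getD x 0 = ((pvOuts g).count x : Int) := by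
    intro x; rw [← hO', PySem.Dict.getD_foldl_modify_add_one]; simp
  have hIgetD : ∀ x, I.getD x 0 = ((pvIns g).count x : Int) := by
    intro x; rw [← hI', PySem.Dict.getD_foldl_modify_add_one]; simp
  -- key characterisations
  have hOK : O.keys = PySem.Set.ofList (pvOuts g) := by
    rw [← hO', pvIncr_keys, PySem.Dict.keys_empty, PySem.Set.update_nil_left]
  have hIK : I.keys = PySem.Set.ofList (pvIns g) := by
    rw [← hI', pvIncr_keys, PySem.Dict.keys_empty, PySem.Set.update_nil_left]
  have hOKn : O.keys.Nodup := by rw [hOK]; exact PySem.Set.nodup_ofList _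
  have hIKn : I.keys.Nodup := by rw [hIK]; exact PySem.Set.nodup_ofList _
  -- O.get? in closed form
  have hOget : ∀ k, O.get? k = if k ∈ pvOuts g then some ((pvOuts g).count k : Int) else none := by
    intro k
    by_cases hk : k ∈ pvOuts g
    · have hmem : k ∈ O.keys := by rw [hOK]; exact (PySem.Set.mem_ofList _ _).mpr hk
      cases hg : O.get? k with
      | none => exact absurd ((PySem.Dict.get?_eq_none_iff_not_mem_keys O k).mp hg) (by simp [hmem])
      | some v =>
          have hv := PySem.Dict.getD_of_get?_eq_some O 0 hg
          rw [hOgetD] at hv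
          simp [hk, ← hv]
    · have : O.get? k = none := (PySem.Dict.get?_eq_none_iff_not_mem_keys O k).mpr
        (by rw [hOK]; simpa [PySem.Set.mem_ofList] using hk)
      simp [hk, this]
  -- B's sorted-lists comparison ↔ the two multisets are permutations ↔ equal counts everywhere
  rw [Bool.eq_iff_iff]
  simp only [Bool.and_eq_true, beq_iff_eq, List.all_eq_true]
  rw [PySem.List.sorted_id_eq_sorted_id_iff_perm, List.perm_iff_count]
  rw [show (g.flatMap (fun kv => kv.2.map (fun _ => kv.1))) = pvOuts g from rfl,
      show (g.flatMap (fun kv => kv.2)) = pvIns g from rfl]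
  simp only [PySem.Dict.size, PySem.Dict.items_eq_map_keys I hIKn 0,
    PySem.Dict.items_eq_map_keys O hOKn 0, List.length_map, List.forall_mem_map]
  simp only [hIgetD, hOget, hIK, hOK, PySem.Set.mem_ofList]
  constructor
  · rintro ⟨hlen, hval⟩ x
    have hsub : ∀ k, k ∈ pvIns g → k ∈ pvOuts g ∧ (pvOuts g).count k = (pvIns g).count k := by
      intro k hk
      have h := hval k hk
      by_cases hko : k ∈ pvOuts g
      · simp only [hko, if_true, Option.some.injEq] at h
        exact ⟨hko, by exact_mod_cast h⟩
      · simp [hko] at h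
    have hsub' : (PySem.Set.ofList (pvIns g)).toFinset ⊆ (PySem.Set.ofList (pvOuts g)).toFinset := by
      intro k hk
      simp only [List.mem_toFinset, PySem.Set.mem_ofList] at *
      exact (hsub k hk).1
    have hcard : (PySem.Set.ofList (pvOuts g)).toFinset.card ≤ (PySem.Set.ofList (pvIns g)).toFinset.card := by
      rw [List.toFinset_card_of_nodup (PySem.Set.nodup_ofList _),
        List.toFinset_card_of_nodup (PySem.Set.nodup_ofList _), hlen]
    have heq := Finset.eq_of_subset_of_card_le hsub' hcard
    have hmemeq : ∀ k, k ∈ pvIns g ↔ k ∈ pvOuts g := by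
      intro k
      have := Finset.ext_iff.mp heq k
      simpa [PySem.Set.mem_ofList] using this
    by_cases hx : x ∈ pvIns g
    · exact (hsub x hx).2
    · have hxo : x ∉ pvOuts g := fun h => hx ((hmemeq x).mpr h)
      rw [List.count_eq_zero_of_not_mem hxo, List.count_eq_zero_of_not_mem hx]
  · intro hcnt
    have hmemeq : ∀ k, k ∈ pvIns g ↔ k ∈ pvOuts g := by
      intro k
      constructor
      · intro hk
        have h1 : 0 < (pvIns g).count k := List.count_pos_iff.mpr hk
        exact List.count_pos_iff.mp (by rw [hcnt k]; omega)
      · intro hk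
        have h1 : 0 < (pvOuts g).count k := List.count_pos_iff.mpr hk
        exact List.count_pos_iff.mp (by rw [← hcnt k]; omega)
    constructor
    · have hperm : (PySem.Set.ofList (pvIns g)).Perm (PySem.Set.ofList (pvOuts g)) := by
        rw [List.perm_ext_iff_of_nodup (PySem.Set.nodup_ofList _) (PySem.Set.nodup_ofList _)]
        intro a; simpa [PySem.Set.mem_ofList] using hmemeq a
      exact hperm.length_eq
    · intro k hk
      have hko : k ∈ pvOuts g := (hmemeq k).mp hk
      rw [hcnt k]
      simp [hko]
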